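-- pv_equiv track=rewrite | github.com/pborenstein/temoa | src/temoa/scripts/transform_github_gleanings.py | select_tags
-- ===== SOURCE A (Python) =====
-- def select_tags(github_topics: list[str], max_tags: int = 7) -> list[str]:
--     """
--     Select most relevant tags from github_topics.
--
--     Prioritizes:
--     - Specific technology/domain terms
--     - Avoids generic terms like 'list', 'directory', 'awesome-list'
--     """
--     # Generic terms to deprioritize
--     generic = {'list', 'directory', 'awesome-list', 'resources', 'collection', 'curated'}
--
--     # Split into priority groups
--     specific = [t for t in github_topics if t not in generic]
--     fallback = [t for t in github_topics if t in generic]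
--
--     # Take specific first, then generic if needed
--     selected = specific[:max_tags]
--     if len(selected) < max_tags:
--         selected.extend(fallback[:max_tags - len(selected)])
--
--     return selected[:max_tags]
-- ===== SOURCE B (Python) =====
-- def select_tags(github_topics: list[str], max_tags: int = 7) -> list[str]:
--     """Select up to max_tags tags, preferring non-generic topics (stable partition by sort)."""
--     generic = {'list', 'directory', 'awesome-list', 'resources', 'collection', 'curated'}
--     ordered = sorted(github_topics, key=lambda t: t in generic)
--     return ordered[:max_tags]
-- ===== Notes on version B (the rewrite author's own statement) =====
-- stated objective: simpler
-- what changed: Replaces the two filter passes plus conditional extend and repeated slicing with one stable sort keyed on 'is generic' followed by a single slice.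
-- intended difference: For negative max_tags with more topics than its magnitude, A's two compounded slices drop twice that many elements and only from the non-generic tags, while B applies the slice once to the whole ordered list; the single-slice reading of the final return statement is the intended one (witness: on the pvDiffWitness input A returns the empty list, B the two non-generic tags). — e.g. on select_tags(["a", "b", "list"], -1): A returns [], B returns ["a", "b"]
import Mathlib
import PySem

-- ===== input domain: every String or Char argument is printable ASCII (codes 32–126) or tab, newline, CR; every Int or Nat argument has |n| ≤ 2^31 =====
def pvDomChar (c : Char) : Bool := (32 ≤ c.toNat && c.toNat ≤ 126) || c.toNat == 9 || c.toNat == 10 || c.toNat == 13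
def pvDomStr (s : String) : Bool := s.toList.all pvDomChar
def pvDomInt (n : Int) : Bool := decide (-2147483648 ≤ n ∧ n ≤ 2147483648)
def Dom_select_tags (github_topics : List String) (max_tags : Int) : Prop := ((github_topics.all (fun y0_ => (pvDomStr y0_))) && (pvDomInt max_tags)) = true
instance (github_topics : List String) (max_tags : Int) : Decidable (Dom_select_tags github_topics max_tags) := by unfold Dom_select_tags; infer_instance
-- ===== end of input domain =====

-- B replaces A's two filter passes + conditional extend + slices by one stable sort on the
-- key "is generic" followed by a single slice (objective: simpler).

-- ===== PORT A =====
-- the set literal {'list', 'directory', 'awesome-list', 'resources', 'collection', 'curated'}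
def pvGeneric : List String :=
  PySem.Set.ofList ["list", "directory", "awesome-list", "resources", "collection", "curated"]

def select_tags (github_topics : List String) (max_tags : Int) : List String :=
  let generic := pvGeneric
  let specific := github_topics.filter (fun t => !(generic.contains t))
  let fallback := github_topics.filter (fun t => generic.contains t)
  let selected := PySem.List.slice specific none (some max_tags)
  let selected :=
    if (selected.length : Int) < max_tags then
      selected ++ PySem.List.slice fallback none (some (max_tags - (selected.length : Int)))
    else selected
  PySem.List.slice selected none (some max_tags)

-- ===== PORT B =====
-- Python's key `t in generic` yields a bool; False < True is ported as the Int key 0 < 1.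
def select_tags_alt (github_topics : List String) (max_tags : Int) : List String :=
  let generic := pvGeneric
  let ordered := PySem.List.sorted github_topics
      (fun t => if generic.contains t then (1 : Int) else 0) false
  PySem.List.slice ordered none (some max_tags)

-- ===== PRECONDITION & SPEC =====
-- For negative max_tags with more topics than |max_tags|, A's two compounded [:max_tags] slices
-- drop 2*|max_tags| elements from the non-generic tags only, while B applies the slice once to
-- the whole ordered list, which is the intended single-slice reading of 'selected[:max_tags]'.
def D_select_tags (github_topics : List String) (max_tags : Int) : Prop :=
  max_tags < 0 ∧ -max_tags < (github_topics.length : Int)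
instance (github_topics : List String) (max_tags : Int) : Decidable (D_select_tags github_topics max_tags) := by unfold D_select_tags; infer_instance

def Spec_select_tags (github_topics : List String) (max_tags : Int) (out : List String) : Prop := ¬ D_select_tags github_topics max_tags → out = select_tags_alt github_topics max_tags
instance (github_topics : List String) (max_tags : Int) (out : List String) : Decidable (Spec_select_tags github_topics max_tags out) := by unfold Spec_select_tags; infer_instance

def pvDiffWitness_select_tags : List String × Int := (["a", "b", "list"], -1)
def pvDiffWitnessOut_select_tags : (List String) × (List String) := ([], ["a", "b"])

-- ===== CLAIM (what is proved, stated in full; the proofs are below) =====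
def Claim_unchanged_select_tags : Prop := ∀ (github_topics : List String) (max_tags : Int), Dom_select_tags github_topics max_tags → Spec_select_tags github_topics max_tags (select_tags github_topics max_tags)
def Claim_changed_select_tags : Prop := Dom_select_tags (pvDiffWitness_select_tags.1) (pvDiffWitness_select_tags.2) ∧ D_select_tags (pvDiffWitness_select_tags.1) (pvDiffWitness_select_tags.2) ∧ select_tags (pvDiffWitness_select_tags.1) (pvDiffWitness_select_tags.2) = pvDiffWitnessOut_select_tags.1 ∧ select_tags_alt (pvDiffWitness_select_tags.1) (pvDiffWitness_select_tags.2) = pvDiffWitnessOut_select_tags.2 ∧ pvDiffWitnessOut_select_tags.1 ≠ pvDiffWitnessOut_select_tags.2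
def Claim_exact_select_tags : Prop := ∀ (github_topics : List String) (max_tags : Int), Dom_select_tags github_topics max_tags → D_select_tags github_topics max_tags → select_tags github_topics max_tags ≠ select_tags_alt github_topics max_tags

-- ===== LEMMAS AND PROOFS =====

-- the cons unfolding of PySem's insertion step (definitional)
theorem pvInsertBy_cons {α : Type} (before : α → α → Bool) (x y : α) (ys : List α) :
    PySem.List.insertBy before x (y :: ys)
      = if before x y then x :: y :: ys else y :: PySem.List.insertBy before x ys := rfl

-- inserting a non-generic tag into "non-generics a ++ generics b" puts it at the boundary
theorem pvIns_notg (x : String) (hx : x ∉ pvGeneric) (a b : List String)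
    (ha : ∀ y ∈ a, y ∉ pvGeneric) (hb : ∀ y ∈ b, y ∈ pvGeneric) :
    PySem.List.insertBy (fun s t => decide ((if s ∈ pvGeneric then (1:Int) else 0) < (if t ∈ pvGeneric then (1:Int) else 0))) x (a ++ b) = a ++ x :: b := by
  induction a with
  | nil =>
    cases b with
    | nil => rfl
    | cons y ys =>
      rw [List.nil_append, pvInsertBy_cons]
      simp [hb y (by simp), hx]
  | cons z a' ih =>
    rw [List.cons_append, pvInsertBy_cons, List.cons_append]
    have h1 : z ∉ pvGeneric := ha z (by simp)
    simp only [h1, hx, if_false, lt_irrefl, decide_false,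
      Bool.false_eq_true, List.cons.injEq, true_and]
    exact ih (fun y hy => ha y (by simp [hy]))

-- inserting a generic tag appends it at the end
theorem pvIns_g (x : String) (hx : x ∈ pvGeneric) (ys : List String) :
    PySem.List.insertBy (fun s t => decide ((if s ∈ pvGeneric then (1:Int) else 0) < (if t ∈ pvGeneric then (1:Int) else 0))) x ys = ys ++ [x] := by
  apply PySem.List.insertBy_of_forall_not_before
  intro y hy
  by_cases h : y ∈ pvGeneric <;> simp [h, hx]

-- loop invariant: the insertion-sort fold keeps "non-generics so far ++ generics so far"
theorem pvFoldl_part (xs : List String) (a b : List String)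
    (ha : ∀ y ∈ a, y ∉ pvGeneric) (hb : ∀ y ∈ b, y ∈ pvGeneric) :
    xs.foldl (fun acc x => PySem.List.insertBy (fun s t => decide ((if s ∈ pvGeneric then (1:Int) else 0) < (if t ∈ pvGeneric then (1:Int) else 0))) x acc) (a ++ b)
      = (a ++ xs.filter (fun t => !decide (t ∈ pvGeneric))) ++ (b ++ xs.filter (fun t => decide (t ∈ pvGeneric))) := by
  induction xs generalizing a b with
  | nil => simp
  | cons x xs ih =>
    by_cases hx : x ∈ pvGeneric
    · rw [List.foldl_cons, pvIns_g x hx (a ++ b), List.append_assoc,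
        ih a (b ++ [x]) ha
          (by intro y hy; rcases List.mem_append.1 hy with h | h
              · exact hb y h
              · rw [List.mem_singleton] at h; subst h; exact hx)]
      simp [hx, List.append_assoc]
    · rw [List.foldl_cons, pvIns_notg x hx a b ha hb,
        show a ++ x :: b = (a ++ [x]) ++ b by simp,
        ih (a ++ [x]) b
          (by intro y hy; rcases List.mem_append.1 hy with h | h
              · exact ha y h
              · rw [List.mem_singleton] at h; subst h; exact hx) hb]
      simp [hx, List.append_assoc]

-- B's stable sort on the 0/1 key is exactly A's stable partition
theorem sorted_partition (xs : List String) :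
    PySem.List.sorted xs (fun t => if pvGeneric.contains t then (1 : Int) else 0) false
      = xs.filter (fun t => !(pvGeneric.contains t)) ++ xs.filter (fun t => pvGeneric.contains t) := by
  rw [PySem.List.sorted_eq_foldl_insertBy]
  simp only [List.contains_eq_mem, decide_eq_true_eq]
  simpa using pvFoldl_part xs [] [] (by simp) (by simp)

-- ===== VERDICT (by name: the statement is the Claim_ definition above) =====
theorem select_tags_spec : Claim_unchanged_select_tags := by
  intro gt m _ hD
  unfold D_select_tags at hD
  show select_tags gt m = select_tags_alt gt m
  simp only [select_tags, select_tags_alt]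
  rw [sorted_partition]
  set sp := gt.filter (fun t => !(pvGeneric.contains t)) with hsp
  set fb := gt.filter (fun t => pvGeneric.contains t) with hfb
  have hsL : sp.length ≤ gt.length := by rw [hsp]; exact List.length_filter_le _ _
  have hsum : sp.length + fb.length = gt.length := by
    have := List.length_eq_length_filter_add (l := gt) (fun t => pvGeneric.contains t)
    rw [hsp, hfb]; omega
  by_cases hm : 0 ≤ m
  · rw [PySem.List.slice_to sp hm]
    split_ifs with hlt
    · have hs : sp.length < m.toNat := by
        rw [List.length_take] at hlt; omega
      rw [List.take_of_length_le (le_of_lt hs)] at *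
      rw [PySem.List.slice_to fb (by omega), PySem.List.slice_to _ hm, PySem.List.slice_to _ hm]
      rw [List.take_append, List.take_append, List.take_take]
      rw [List.take_of_length_le (by omega)]
      congr 2
      omega
    · rw [List.length_take] at hlt
      have hn : m.toNat ≤ sp.length := by omega
      rw [PySem.List.slice_to _ hm, PySem.List.slice_to _ hm, List.take_take, List.take_append]
      rw [Nat.sub_eq_zero_of_le hn]
      simp
  · have hm0 : m < 0 := by omega
    have hL : (gt.length : Int) ≤ -m := by
      by_contra h; exact hD ⟨hm0, by omega⟩
    obtain ⟨k, hk, hkpos⟩ : ∃ k : Nat, m = -(k:Int) ∧ 0 < k := ⟨(-m).toNat, by omega, by omega⟩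
    subst hk
    rw [PySem.List.slice_to_neg_natCast sp k hkpos, PySem.List.slice_to_neg_natCast (sp ++ fb) k hkpos]
    have h1 : sp.length - k = 0 := by omega
    rw [h1, List.take_zero]
    simp only [List.length_nil, Nat.cast_zero]
    rw [if_neg (by omega)]
    rw [List.length_append]
    have h2 : sp.length + fb.length - k = 0 := by omega
    rw [h2, List.take_zero, PySem.List.slice_to_neg_natCast ([] : List String) k hkpos]
    simp

theorem select_tags_changed : Claim_changed_select_tags := by
  unfold Claim_changed_select_tags; decide

theorem select_tags_tight : Claim_exact_select_tags := by
  intro gt m _ hDm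
  obtain ⟨hm, hL⟩ := hDm
  simp only [select_tags, select_tags_alt]
  rw [sorted_partition]
  set sp := gt.filter (fun t => !(pvGeneric.contains t)) with hsp
  set fb := gt.filter (fun t => pvGeneric.contains t) with hfb
  have hsL : sp.length ≤ gt.length := by rw [hsp]; exact List.length_filter_le _ _
  have hsum : sp.length + fb.length = gt.length := by
    have := List.length_eq_length_filter_add (l := gt) (fun t => pvGeneric.contains t)
    rw [hsp, hfb]; omega
  obtain ⟨k, hk, hkpos⟩ : ∃ k : Nat, m = -(k:Int) ∧ 0 < k := ⟨(-m).toNat, by omega, by omega⟩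
  subst hk
  have hkL : k < gt.length := by omega
  rw [PySem.List.slice_to_neg_natCast sp k hkpos, PySem.List.slice_to_neg_natCast (sp ++ fb) k hkpos]
  rw [if_neg (by push_cast; omega)]
  rw [PySem.List.slice_to_neg_natCast _ k hkpos]
  intro heq
  have hlen := congrArg List.length heq
  simp only [List.length_take, List.length_append] at hlen
  omega
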